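-- pv_equiv track=rewrite | github.com/Ipsedo/ToxicComment | data/transform_data.py | mk_vocab
-- ===== SOURCE A (Python) =====
-- limit_count = 10
--
-- padding = "<pad>"
--
-- def mk_vocab(data):
--     vocab = {padding: 0}
--     count = {}
--     for (ident, p) in data:
--         for w in p:
--             if w not in count:
--                 count[w] = 1
--             else:
--                 count[w] += 1
--     for (ident, p) in data:
--         for w in p:
--             if w not in vocab and count[w] > limit_count:
--                 vocab[w] = len(vocab)
--     return count, vocab
-- ===== SOURCE B (Python) =====
-- limit_count = 10
--
-- padding = "<pad>"
--
--
-- def mk_vocab(data):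
--     # Flatten once, count over the flat word list, then derive the vocab from a
--     # filtered pass over the count index instead of rescanning the raw data.
--     words = [w for _ident, p in data for w in p]
--     count = {}
--     for w in words:
--         count[w] = count.get(w, 0) + 1
--     big = [w for w, c in count.items() if c > limit_count and w != padding]
--     vocab = {padding: 0}
--     for w in big:
--         vocab[w] = len(vocab)
--     return count, vocab
-- ===== Notes on version B (the rewrite author's own statement) =====
-- stated objective: simpler
-- what changed: A's second nested rescan of the raw data is replaced by one filtered pass over the already-built count index (dict insertion order = first-occurrence order), with the words flattened once up front and counted with dict.get instead of an if/else membership branch.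
import Mathlib
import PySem

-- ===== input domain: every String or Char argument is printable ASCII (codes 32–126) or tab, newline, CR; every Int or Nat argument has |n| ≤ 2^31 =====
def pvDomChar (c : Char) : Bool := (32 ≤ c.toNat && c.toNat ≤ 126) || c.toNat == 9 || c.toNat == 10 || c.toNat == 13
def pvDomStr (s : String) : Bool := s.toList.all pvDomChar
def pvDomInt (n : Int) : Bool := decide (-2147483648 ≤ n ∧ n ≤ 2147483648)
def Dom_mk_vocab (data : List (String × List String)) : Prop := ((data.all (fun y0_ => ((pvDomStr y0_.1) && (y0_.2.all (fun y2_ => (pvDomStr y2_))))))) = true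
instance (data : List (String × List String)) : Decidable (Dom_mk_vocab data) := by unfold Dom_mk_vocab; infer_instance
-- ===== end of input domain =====

-- B flattens the words once, counts them in one pass, and derives the vocab from a
-- filtered pass over the count index instead of A's second nested rescan of the data.

def limit_count : Int := 10

def padding : String := "<pad>"

-- ===== PORT A =====
def mk_vocab (data : List (String × List String)) : (List (String × Int)) × (List (String × Int)) :=
  let vocab : PySem.Dict String Int := PySem.Dict.empty.insert padding 0
  let count : PySem.Dict String Int :=
    data.foldl (fun c pr =>
      pr.2.foldl (fun c w =>
        if c.contains w = false then c.insert w 1 else c.modify w 0 (· + 1)) c)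
      PySem.Dict.empty
  -- count[w] is ported as getD: w was counted in the first loop, so the lookup never raises
  let vocab :=
    data.foldl (fun v pr =>
      pr.2.foldl (fun v w =>
        if v.contains w = false ∧ limit_count < count.getD w 0 then v.insert w (v.size : Int) else v) v)
      vocab
  (count.items, vocab.items)

-- ===== PORT B =====
def mk_vocab_alt (data : List (String × List String)) : (List (String × Int)) × (List (String × Int)) :=
  let words : List String := data.flatMap (fun pr => pr.2)
  let count : PySem.Dict String Int :=
    words.foldl (fun c w => c.insert w (c.getD w 0 + 1)) PySem.Dict.empty
  let big : List String :=
    (count.items.filter (fun wc => decide (limit_count < wc.2) && (wc.1 != padding))).map (·.1)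
  let vocab : PySem.Dict String Int :=
    big.foldl (fun v w => v.insert w (v.size : Int)) (PySem.Dict.empty.insert padding 0)
  (count.items, vocab.items)

-- ===== PRECONDITION & SPEC =====
def Spec_mk_vocab (data : List (String × List String)) (out : (List (String × Int)) × (List (String × Int))) : Prop := out = mk_vocab_alt data
instance (data : List (String × List String)) (out : (List (String × Int)) × (List (String × Int))) : Decidable (Spec_mk_vocab data out) := by unfold Spec_mk_vocab; infer_instance

-- ===== CLAIM =====
def Claim_equal_mk_vocab : Prop := ∀ (data : List (String × List String)), Dom_mk_vocab data → Spec_mk_vocab data (mk_vocab data)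

-- ===== LEMMAS AND PROOFS =====

-- A's counting step equals the insert/getD counting step, for every dict and word.
lemma cstep_eq (c : PySem.Dict String Int) (w : String) :
    (if c.contains w = false then c.insert w 1 else c.modify w 0 (· + 1))
      = c.insert w (c.getD w 0 + 1) := by
  by_cases h : c.contains w = false
  · simp only [h, if_true]
    rw [PySem.Dict.getD_of_not_contains c 0 h]
    norm_num
  · simp only [h]
    rfl

-- A's vocab-building step, with the count expressed over the final multiset of words
def vstep (ws : List String) (v : PySem.Dict String Int) (w : String) : PySem.Dict String Int :=
  if v.contains w = false ∧ limit_count < (ws.count w : Int) then v.insert w (v.size : Int) else v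

-- 'w can no longer change the vocab'
def vdone (ws : List String) (v : PySem.Dict String Int) (w : String) : Prop :=
  v.contains w = true ∨ ¬ limit_count < (ws.count w : Int)

lemma vstep_of_done {ws : List String} {v : PySem.Dict String Int} {w : String}
    (h : vdone ws v w) : vstep ws v w = v := by
  rcases h with h | h <;> simp [vstep, h]

lemma done_mono {ws : List String} {v : PySem.Dict String Int} {x : String}
    (h : vdone ws v x) (w : String) : vdone ws (vstep ws v w) x := by
  rcases h with h | h
  · left
    unfold vstep
    split_ifs with hc
    · simp [PySem.Dict.contains_insert, h]
    · exact h
  · right; exact h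

lemma done_self (ws : List String) (v : PySem.Dict String Int) (w : String) :
    vdone ws (vstep ws v w) w := by
  unfold vstep
  split_ifs with hc
  · left; exact PySem.Dict.contains_insert_self _ _ _
  · rcases not_and_or.mp hc with h | h
    · left; simpa using h
    · right; exact h

lemma foldl_done_id (ws : List String) :
    ∀ (s : List String) (v : PySem.Dict String Int),
      (∀ w ∈ s, vdone ws v w) → s.foldl (vstep ws) v = v := by
  intro s
  induction s with
  | nil => intro v _; rfl
  | cons w t ih =>
    intro v h
    have hw : vstep ws v w = v := vstep_of_done (h w (by simp))
    simp only [List.foldl_cons, hw]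
    exact ih v (fun x hx => h x (by simp [hx]))

lemma set_update_append : ∀ (l s : List String), ∃ t, PySem.Set.update s l = s ++ t := by
  intro l
  induction l with
  | nil => intro s; exact ⟨[], (List.append_nil s).symm⟩
  | cons x l ih =>
    intro s
    have h1 : PySem.Set.update s (x :: l) = PySem.Set.update (PySem.Set.add s x) l := rfl
    by_cases hx : x ∈ s
    · have hadd : PySem.Set.add s x = s := by simp [PySem.Set.add, PySem.Set.contains, hx]
      rw [h1, hadd]; exact ih s
    · have hadd : PySem.Set.add s x = s ++ [x] := by simp [PySem.Set.add, PySem.Set.contains, hx]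
      rw [h1, hadd]
      obtain ⟨t, ht⟩ := ih (s ++ [x])
      exact ⟨[x] ++ t, by simp [ht]⟩

-- folding A's step over all words equals folding it over the distinct words
lemma foldl_vstep_set (ws : List String) :
    ∀ (l : List String) (v : PySem.Dict String Int) (s : List String),
      (∀ w ∈ s, vdone ws v w) →
      l.foldl (vstep ws) v = (PySem.Set.update s l).foldl (vstep ws) v := by
  intro l
  induction l with
  | nil =>
    intro v s h
    exact (foldl_done_id ws s v h).symm
  | cons w l ih =>
    intro v s h
    have h1 : PySem.Set.update s (w :: l) = PySem.Set.update (PySem.Set.add s w) l := rfl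
    by_cases hw : w ∈ s
    · have hadd : PySem.Set.add s w = s := by simp [PySem.Set.add, PySem.Set.contains, hw]
      have hid : vstep ws v w = v := vstep_of_done (h w hw)
      rw [h1, hadd, List.foldl_cons, hid]
      exact ih v s h
    · have hadd : PySem.Set.add s w = s ++ [w] := by simp [PySem.Set.add, PySem.Set.contains, hw]
      have h' : ∀ x ∈ s ++ [w], vdone ws (vstep ws v w) x := by
        intro x hx
        rcases List.mem_append.mp hx with hx | hx
        · exact done_mono (h x hx) w
        · have hxw : x = w := by simpa using hx
          rw [hxw]
          exact done_self ws v w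
      obtain ⟨t, ht⟩ := set_update_append l (s ++ [w])
      have key : (s ++ [w]).foldl (vstep ws) (vstep ws v w) = vstep ws v w :=
        foldl_done_id ws (s ++ [w]) (vstep ws v w) h'
      have hsv : (s ++ [w]).foldl (vstep ws) v = vstep ws v w := by
        rw [List.foldl_append, foldl_done_id ws s v h]; rfl
      rw [h1, hadd, ht, List.foldl_append, hsv, List.foldl_cons]
      calc l.foldl (vstep ws) (vstep ws v w)
          = (PySem.Set.update (s ++ [w]) l).foldl (vstep ws) (vstep ws v w) :=
            ih (vstep ws v w) (s ++ [w]) h'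
        _ = t.foldl (vstep ws) (vstep ws v w) := by
            rw [ht, List.foldl_append, key]

-- over a nodup list of words none of which is in v except possibly padding,
-- A's guarded step equals B's plain insert over the filtered list
lemma foldl_vstep_filter (ws : List String) :
    ∀ (l : List String) (v : PySem.Dict String Int), l.Nodup →
      (∀ x ∈ l, v.contains x = decide (x = padding)) →
      l.foldl (vstep ws) v
        = (l.filter (fun w => decide (limit_count < (ws.count w : Int)) && (w != padding))).foldl
            (fun v w => v.insert w (v.size : Int)) v := by
  intro l
  induction l with
  | nil => intro v _ _; rfl
  | cons w t ih =>
    intro v hnd h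
    have hwt : w ∉ t := (List.nodup_cons.mp hnd).1
    have hndt : t.Nodup := (List.nodup_cons.mp hnd).2
    have hcw : v.contains w = decide (w = padding) := h w (by simp)
    by_cases hp : w = padding
    · subst hp
      have hc : v.contains padding = true := by simpa using hcw
      have hv : vstep ws v padding = v := by simp [vstep, hc]
      simp only [List.foldl_cons, List.filter_cons]
      simp only [bne_self_eq_false, Bool.and_false, if_neg (by simp : ¬ (false = true))]
      rw [hv]
      exact ih v hndt (fun x hx => h x (by simp [hx]))
    · have hcw' : v.contains w = false := by simp [hcw, hp]
      by_cases hcnt : limit_count < (ws.count w : Int)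
      · have hv : vstep ws v w = v.insert w (v.size : Int) := by
          simp [vstep, hcw', hcnt]
        have hfil : (w :: t).filter (fun w => decide (limit_count < (ws.count w : Int)) && (w != padding))
            = w :: t.filter (fun w => decide (limit_count < (ws.count w : Int)) && (w != padding)) := by
          simp [hcnt, hp]
        rw [List.foldl_cons, hv, hfil, List.foldl_cons]
        apply ih _ hndt
        intro x hx
        have hxw : x ≠ w := fun hxe => hwt (hxe ▸ hx)
        rw [PySem.Dict.contains_insert]
        simp [hxw, h x (by simp [hx])]
      · have hv : vstep ws v w = v := by simp [vstep, hcnt]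
        have hfil : (w :: t).filter (fun w => decide (limit_count < (ws.count w : Int)) && (w != padding))
            = t.filter (fun w => decide (limit_count < (ws.count w : Int)) && (w != padding)) := by
          simp [hcnt]
        rw [List.foldl_cons, hv, hfil]
        exact ih v hndt (fun x hx => h x (by simp [hx]))

-- ===== VERDICT =====
theorem mk_vocab_spec : Claim_equal_mk_vocab := by
  intro data _
  unfold Spec_mk_vocab mk_vocab mk_vocab_alt
  dsimp only
  set ws : List String := data.flatMap (fun pr => pr.2) with hws
  set v0 : PySem.Dict String Int := PySem.Dict.empty.insert padding 0 with hv0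
  have hflat : ∀ {α : Type} (f : α → String → α) (init : α),
      data.foldl (fun a pr => pr.2.foldl f a) init = ws.foldl f init := by
    intro α f init
    rw [hws, List.foldl_flatMap]
  -- both counting loops build counter ws
  have hcA : data.foldl (fun c pr =>
        pr.2.foldl (fun c w =>
          if c.contains w = false then c.insert w 1 else c.modify w 0 (· + 1)) c)
        PySem.Dict.empty
      = PySem.Dict.counter ws := by
    simp only [cstep_eq]
    rw [hflat, PySem.Dict.foldl_insert_getD_add_one_eq_counter]
  have hcB : ws.foldl (fun c w => c.insert w (c.getD w 0 + 1)) PySem.Dict.empty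
      = PySem.Dict.counter ws := PySem.Dict.foldl_insert_getD_add_one_eq_counter ws
  rw [hcA, hcB]
  -- A's vocab loop is the fold of vstep over all words, hence over the distinct words
  have hvA : ws.foldl (fun v w =>
        if v.contains w = false ∧ limit_count < (PySem.Dict.counter ws).getD w 0
        then v.insert w (v.size : Int) else v) v0
      = ws.foldl (vstep ws) v0 := by
    apply PySem.List.foldl_congr_mem
    intro v w _
    simp only [vstep, PySem.Dict.getD_counter]
  -- B's filtered key list is the filter of the distinct words
  have hbig : ((PySem.Dict.counter ws).items.filter
        (fun wc => decide (limit_count < wc.2) && (wc.1 != padding))).map (·.1)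
      = (PySem.Set.ofList ws).filter
          (fun w => decide (limit_count < (ws.count w : Int)) && (w != padding)) := by
    rw [PySem.Dict.items_counter, List.filter_map, List.map_map]
    simp [Function.comp_def]
  have h0 : ∀ x ∈ PySem.Set.ofList ws, v0.contains x = decide (x = padding) := by
    intro x _
    rw [hv0, PySem.Dict.contains_insert]
    simp [PySem.Dict.contains_empty, beq_eq_decide]
  have hset : ws.foldl (vstep ws) v0 = (PySem.Set.ofList ws).foldl (vstep ws) v0 :=
    foldl_vstep_set ws ws v0 [] (by simp)
  rw [hflat, hvA, hset, hbig,
    foldl_vstep_filter ws (PySem.Set.ofList ws) v0 (PySem.Set.nodup_ofList ws) h0]
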